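-- pv_equiv track=rewrite | github.com/Tejas07PSK/lb_dsa_cracker | Dynamic Programming/Largest rectangular sub-matrix whose sum is 0/solution.py | sumZeroMatrix
-- ===== SOURCE A (Python) =====
-- from typing import List
--
-- def sumZeroMatrix (a: List[List[int]]) -> List[List[int]]:
--     row_sz, col_sz = len(a), len(a[0])
--     mx_rct_ar = -1
--     mx_rct_row_start, mx_rct_row_end = -1, -1
--     mx_rct_col_start, mx_rct_col_end = -1, -1
--     tmp_row_sum_arr = [0 for i in range(row_sz)]
--     seen_before = {}
--     for col_left in range(col_sz):
--         for col_right in range(col_left, col_sz):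
--             for row in range(row_sz): tmp_row_sum_arr[row] += a[row][col_right]
--             mx_col_sz = col_right - col_left + 1
--             mx_row_sz, mx_row_start, mx_row_end = -1, -1, -1
--             tot = 0
--             for row in range(row_sz):
--                 tot += tmp_row_sum_arr[row]
--                 if (tmp_row_sum_arr[row] == 0):
--                     if (1 > mx_row_sz):
--                         mx_row_start, mx_row_end, mx_row_sz = row, row, 1
--                 if (tot == 0):
--                     if ((row + 1) > mx_row_sz):
--                         mx_row_start, mx_row_end, mx_row_sz = 0, row, row + 1
--                 if (tot in seen_before):
--                     if ((row - seen_before[tot]) > mx_row_sz):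
--                         mx_row_start, mx_row_end, mx_row_sz = seen_before[tot] + 1, row, (row - seen_before[tot])
--                 else: seen_before[tot] = row
--                 if (col_right == (col_sz - 1)): tmp_row_sum_arr[row] = 0
--             if ((mx_row_sz * mx_col_sz) > (mx_rct_ar)):
--                 mx_rct_ar = (mx_row_sz * mx_col_sz)
--                 mx_rct_row_start = mx_row_start
--                 mx_rct_row_end = mx_row_end
--                 mx_rct_col_start = col_left
--                 mx_rct_col_end = col_right
--             seen_before.clear()
--     if (mx_rct_ar == -1): return []
--     return [[a[i][j] for j in range(mx_rct_col_start, mx_rct_col_end + 1)] for i in range(mx_rct_row_start, mx_rct_row_end + 1)]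
-- ===== SOURCE B (Python) =====
-- from typing import List
--
-- def sumZeroMatrix(a: List[List[int]]) -> List[List[int]]:
--     row_sz, col_sz = len(a), len(a[0])
--     # 2-D prefix-sum table: P[i][j] = sum of the submatrix a[0:i][0:j]
--     P = [[0] * (col_sz + 1) for _ in range(row_sz + 1)]
--     for i in range(row_sz):
--         for j in range(col_sz):
--             P[i + 1][j + 1] = P[i][j + 1] + P[i + 1][j] - P[i][j] + a[i][j]
--     best = -1
--     bt = bb = bl = br = -1
--     # brute force over all rectangles, O(1) sum test per rectangle
--     for l in range(col_sz):
--         for r in range(l, col_sz):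
--             for bot in range(row_sz):
--                 for top in range(bot + 1):
--                     if P[bot + 1][r + 1] - P[top][r + 1] - P[bot + 1][l] + P[top][l] == 0:
--                         area = (bot - top + 1) * (r - l + 1)
--                         if area > best:
--                             best, bt, bb, bl, br = area, top, bot, l, r
--     if best == -1:
--         return []
--     return [row[bl:br + 1] for row in a[bt:bb + 1]]
-- ===== Notes on version B (the rewrite author's own statement) =====
-- stated objective: alternative
-- what changed: B drops A's incrementally-updated running column-sum array and first-occurrence hashmap subarray trick entirely: it precomputes a 2-D prefix-sum table and brute-forces every (top,bottom,left,right) rectangle with an O(1) zero-sum test, streaming strict-'>' area updates in the same enumeration order so the selected rectangle is identical.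
import Mathlib
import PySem

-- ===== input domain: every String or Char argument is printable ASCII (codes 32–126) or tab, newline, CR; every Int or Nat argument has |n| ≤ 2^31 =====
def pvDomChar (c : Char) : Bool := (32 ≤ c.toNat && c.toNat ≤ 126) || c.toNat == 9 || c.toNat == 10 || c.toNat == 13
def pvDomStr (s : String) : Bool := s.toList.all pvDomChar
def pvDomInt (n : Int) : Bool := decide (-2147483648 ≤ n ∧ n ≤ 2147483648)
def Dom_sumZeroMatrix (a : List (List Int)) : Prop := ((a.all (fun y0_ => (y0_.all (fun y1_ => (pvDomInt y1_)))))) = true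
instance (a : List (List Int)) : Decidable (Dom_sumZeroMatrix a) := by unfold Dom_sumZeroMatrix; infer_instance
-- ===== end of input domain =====

-- B replaces A's incremental column-sums plus first-occurrence-hashmap subarray trick by a 2-D
-- prefix-sum table and an exhaustive scan over all (top,bottom,left,right) rectangles with an
-- O(1) zero-sum test per rectangle; objective: alternative algorithm, not faster.

-- ===== PORT A =====
-- for row in range(row_sz): tmp_row_sum_arr[row] += a[row][col_right]
def aUpd (a : List (List Int)) (r : Nat) (t : List Int) (i : Nat) : List Int :=
  t.set i (t.getD i 0 + ((a.getD i []).getD r 0))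

structure AScan where
  tot : Int
  seen : PySem.Dict Int Int
  mx : Int
  ms : Int
  me : Int
  tmp : List Int

-- one iteration of A's inner 'for row in range(row_sz)' scan
def aStep (colSz r : Nat) (st : AScan) (i : Nat) : AScan :=
  let v := st.tmp.getD i 0
  let tot := st.tot + v
  let s1 : Int × Int × Int :=
    if v = 0 ∧ 1 > st.mx then ((1 : Int), (i : Int), (i : Int)) else (st.mx, st.ms, st.me)
  let s2 : Int × Int × Int :=
    if tot = 0 ∧ (i : Int) + 1 > s1.1 then ((i : Int) + 1, (0 : Int), (i : Int)) else s1
  let tmp := if r = colSz - 1 then st.tmp.set i 0 else st.tmp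
  match st.seen.get? tot with
  | some j =>
      if (i : Int) - j > s2.1 then ⟨tot, st.seen, (i : Int) - j, j + 1, (i : Int), tmp⟩
      else ⟨tot, st.seen, s2.1, s2.2.1, s2.2.2, tmp⟩
  | none => ⟨tot, st.seen.insert tot (i : Int), s2.1, s2.2.1, s2.2.2, tmp⟩

-- body of A's (col_left, col_right) iteration: update tmp, scan rows, maybe improve the best rectangle
def aInner (a : List (List Int)) (rowSz colSz l r : Nat)
    (best : Int × Int × Int × Int × Int) (tmp : List Int) :
    (Int × Int × Int × Int × Int) × List Int :=
  let tmp := (List.range rowSz).foldl (aUpd a r) tmp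
  let st := (List.range rowSz).foldl (aStep colSz r) ⟨0, PySem.Dict.empty, -1, -1, -1, tmp⟩
  let best := if st.mx * ((r : Int) - (l : Int) + 1) > best.1
    then (st.mx * ((r : Int) - (l : Int) + 1), st.ms, st.me, (l : Int), (r : Int)) else best
  (best, st.tmp)

def sumZeroMatrix (a : List (List Int)) : List (List Int) :=
  let rowSz := a.length
  let colSz := (a.getD 0 []).length
  let res := (List.range colSz).foldl (fun st l =>
      (List.range' l (colSz - l)).foldl (fun st r => aInner a rowSz colSz l r st.1 st.2) st)
    ((-1, -1, -1, -1, -1), List.replicate rowSz 0)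
  let best := res.1
  if best.1 = -1 then []
  else (PySem.List.pyRange best.2.1 (best.2.2.1 + 1) 1).map (fun i =>
    (PySem.List.pyRange best.2.2.2.1 (best.2.2.2.2 + 1) 1).map (fun j =>
      PySem.List.pyGetD (PySem.List.pyGetD a i []) j 0))

-- ===== PORT B =====
-- P[i+1][j+1] = P[i][j+1] + P[i+1][j] - P[i][j] + a[i][j]  (2-D prefix-sum table)
def bBuild (a : List (List Int)) (rowSz colSz : Nat) : List (List Int) :=
  (List.range rowSz).foldl (fun P i =>
      (List.range colSz).foldl (fun P j =>
        P.set (i+1) ((P.getD (i+1) []).set (j+1)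
          ((P.getD i []).getD (j+1) 0 + (P.getD (i+1) []).getD j 0
            - (P.getD i []).getD j 0 + (a.getD i []).getD j 0))) P)
    (List.replicate (rowSz+1) (List.replicate (colSz+1) 0))

-- innermost 'for top in range(bot+1)' body: O(1) zero-sum test, strict '>' update
def bTop (P : List (List Int)) (l r bot : Nat)
    (best : Int × Int × Int × Int × Int) (top : Nat) : Int × Int × Int × Int × Int :=
  if (P.getD (bot+1) []).getD (r+1) 0 - (P.getD top []).getD (r+1) 0
      - (P.getD (bot+1) []).getD l 0 + (P.getD top []).getD l 0 = 0 then
    let area := ((bot : Int) - (top : Int) + 1) * ((r : Int) - (l : Int) + 1)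
    if area > best.1 then (area, (top : Int), (bot : Int), (l : Int), (r : Int)) else best
  else best

-- 'for bot in range(row_sz)' body
def bBot (P : List (List Int)) (l r : Nat)
    (best : Int × Int × Int × Int × Int) (bot : Nat) : Int × Int × Int × Int × Int :=
  (List.range (bot+1)).foldl (bTop P l r bot) best

def sumZeroMatrix_alt (a : List (List Int)) : List (List Int) :=
  let rowSz := a.length
  let colSz := (a.getD 0 []).length
  let P := bBuild a rowSz colSz
  let best := (List.range colSz).foldl (fun best l =>
      (List.range' l (colSz - l)).foldl (fun best r =>
        (List.range rowSz).foldl (bBot P l r) best) best)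
    ((-1, -1, -1, -1, -1) : Int × Int × Int × Int × Int)
  if best.1 = -1 then []
  else (PySem.List.slice a (some best.2.1) (some (best.2.2.1 + 1))).map
    (fun row => PySem.List.slice row (some best.2.2.2.1) (some (best.2.2.2.2 + 1)))

-- ===== PRECONDITION & SPEC =====
-- Pre_ excludes exactly the inputs on which the Python A raises IndexError: the empty matrix
-- (a[0] fails) and matrices with a row shorter than the first row (a[row][col_right] fails).
def Pre_sumZeroMatrix (a : List (List Int)) : Prop :=
  a ≠ [] ∧ ∀ row ∈ a, (a.headD []).length ≤ row.length
instance (a : List (List Int)) : Decidable (Pre_sumZeroMatrix a) := by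
  unfold Pre_sumZeroMatrix; infer_instance

def pvWitness_sumZeroMatrix : List (List Int) := [[1, -1], [2, 3]]

def Spec_sumZeroMatrix (a : List (List Int)) (out : List (List Int)) : Prop := out = sumZeroMatrix_alt a
instance (a : List (List Int)) (out : List (List Int)) : Decidable (Spec_sumZeroMatrix a out) := by
  unfold Spec_sumZeroMatrix; infer_instance

-- ===== CLAIM (what is proved, stated in full; the proofs are below) =====
def Claim_equal_sumZeroMatrix : Prop :=
  ∀ (a : List (List Int)), Dom_sumZeroMatrix a → Pre_sumZeroMatrix a →
    Spec_sumZeroMatrix a (sumZeroMatrix a)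

-- ===== LEMMAS AND PROOFS =====

-- sum of row i over the column range [l, r]
def sval (a : List (List Int)) (l r i : Nat) : Int :=
  ((a.getD i []).take (r + 1)).sum - ((a.getD i []).take l).sum

-- prefix sums of those row sums
def pvPref (a : List (List Int)) (l r k : Nat) : Int :=
  ((List.range k).map (sval a l r)).sum

-- value of the 2-D prefix table: sum of the submatrix a[0:i][0:j]
def Pval (a : List (List Int)) (i j : Nat) : Int :=
  ((a.take i).map (fun row => (row.take j).sum)).sum

-- canonical per-row candidate update both programs implement: at ending row i the longest
-- zero-sum run of row sums ends at the least s with pvPref s = pvPref (i+1)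
def specStep (pf : Nat → Int) (M : Int × Int × Int) (i : Nat) : Int × Int × Int :=
  match (List.range (i+1)).find? (fun s => pf s == pf (i+1)) with
  | some s => if (i : Int) - s + 1 > M.1 then ((i : Int) - s + 1, (s : Int), (i : Int)) else M
  | none => M

-- collapsed form of B's top-loop
def pvBotStep (pf : Nat → Int) (w lI rI : Int)
    (best : Int × Int × Int × Int × Int) (bot : Nat) : Int × Int × Int × Int × Int :=
  match (List.range (bot+1)).find? (fun s => pf s == pf (bot+1)) with
  | some s => if ((bot : Int) - s + 1) * w > best.1
      then (((bot : Int) - s + 1) * w, (s : Int), (bot : Int), lI, rI) else best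
  | none => best

-- bounds carried for the best rectangle
def Box (rowSz colSz : Nat) (b : Int × Int × Int × Int × Int) : Prop :=
  (b.1 = -1 ∧ b.2.1 = -1 ∧ b.2.2.1 = -1 ∧ b.2.2.2.1 = -1 ∧ b.2.2.2.2 = -1) ∨
    (1 ≤ b.1 ∧ 0 ≤ b.2.1 ∧ b.2.1 ≤ b.2.2.1 ∧ b.2.2.1 < (rowSz : Int) ∧
     0 ≤ b.2.2.2.1 ∧ b.2.2.2.1 ≤ b.2.2.2.2 ∧ b.2.2.2.2 < (colSz : Int))

lemma pv_getD_set_eq {α : Type} (d : α) (t : List α) (i : Nat) (h : i < t.length) (v : α) :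
    (t.set i v).getD i d = v := by
  simp [List.getD_eq_getElem?_getD, h]

lemma pv_getD_set_ne {α : Type} (d : α) (t : List α) (i j : Nat) (h : i ≠ j) (v : α) :
    (t.set i v).getD j d = t.getD j d := by
  simp [List.getD_eq_getElem?_getD, h]

lemma pv_take_succ_sum (row : List Int) (k : Nat) :
    (row.take (k + 1)).sum = (row.take k).sum + row.getD k 0 := by
  rw [List.take_add_one]
  cases h : row[k]? <;> simp [List.getD_eq_getElem?_getD, h]

lemma pv_pref_succ (a : List (List Int)) (l r k : Nat) :
    pvPref a l r (k + 1) = pvPref a l r k + sval a l r k := by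
  simp [pvPref, List.range_succ]

lemma pv_pref_zero (a : List (List Int)) (l r : Nat) : pvPref a l r 0 = 0 := by
  simp [pvPref]

lemma pv_Pval_zero_row (a : List (List Int)) (j : Nat) : Pval a 0 j = 0 := by
  simp [Pval]

lemma pv_Pval_zero_col (a : List (List Int)) (i : Nat) : Pval a i 0 = 0 := by
  simp [Pval]

lemma pv_Pval_succ_row (a : List (List Int)) (i j : Nat) (hi : i < a.length) :
    Pval a (i+1) j = Pval a i j + ((a.getD i []).take j).sum := by
  have h : a.getD i [] = a[i] := by
    rw [List.getD_eq_getElem?_getD, List.getElem?_eq_getElem hi]; rfl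
  have h2 : a.take (i+1) = a.take i ++ [a[i]] := by
    rw [List.take_add_one, List.getElem?_eq_getElem hi]; rfl
  rw [Pval, Pval, h2, List.map_append, List.sum_append, h]
  simp

lemma pv_Pval_rec (a : List (List Int)) (i j : Nat) (hi : i < a.length) :
    Pval a (i+1) (j+1) =
      Pval a i (j+1) + Pval a (i+1) j - Pval a i j + (a.getD i []).getD j 0 := by
  rw [pv_Pval_succ_row a i (j+1) hi, pv_Pval_succ_row a i j hi, pv_take_succ_sum]
  ring

lemma pv_Pcol (a : List (List Int)) (l r i : Nat) (hi : i ≤ a.length) :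
    Pval a i (r+1) - Pval a i l = pvPref a l r i := by
  induction i with
  | zero => simp [pv_Pval_zero_row, pv_pref_zero]
  | succ i ih =>
    rw [pv_Pval_succ_row a i (r+1) (by omega), pv_Pval_succ_row a i l (by omega),
      pv_pref_succ, ← ih (by omega), sval]
    ring

-- inner fill: after kj steps of the column loop for fixed row i
lemma pv_fill_aux (a : List (List Int)) (rowSz colSz i kj : Nat) (hkj : kj ≤ colSz)
    (hi : i < rowSz) (hia : rowSz = a.length)
    (P : List (List Int)) (hlen : P.length = rowSz + 1)
    (hrow : ∀ q ∈ P, q.length = colSz + 1)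
    (hval : ∀ i', i' ≤ rowSz → ∀ j', j' ≤ colSz →
      (P.getD i' []).getD j' 0 = if i' ≤ i then Pval a i' j' else 0) :
    ((List.range kj).foldl (fun P j =>
        P.set (i+1) ((P.getD (i+1) []).set (j+1)
          ((P.getD i []).getD (j+1) 0 + (P.getD (i+1) []).getD j 0
            - (P.getD i []).getD j 0 + (a.getD i []).getD j 0))) P).length = rowSz + 1 ∧
    (∀ q ∈ ((List.range kj).foldl (fun P j =>
        P.set (i+1) ((P.getD (i+1) []).set (j+1)
          ((P.getD i []).getD (j+1) 0 + (P.getD (i+1) []).getD j 0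
            - (P.getD i []).getD j 0 + (a.getD i []).getD j 0))) P), q.length = colSz + 1) ∧
    (∀ i', i' ≤ rowSz → ∀ j', j' ≤ colSz →
      (((List.range kj).foldl (fun P j =>
        P.set (i+1) ((P.getD (i+1) []).set (j+1)
          ((P.getD i []).getD (j+1) 0 + (P.getD (i+1) []).getD j 0
            - (P.getD i []).getD j 0 + (a.getD i []).getD j 0))) P).getD i' []).getD j' 0 =
        if i' ≤ i then Pval a i' j' else if i' = i + 1 ∧ j' ≤ kj then Pval a i' j' else 0) := by
  induction kj with
  | zero =>
    simp only [List.range_zero, List.foldl_nil]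
    refine ⟨hlen, hrow, ?_⟩
    intro i' h1 j' h2
    rw [hval i' h1 j' h2]
    split_ifs with c1 c2
    · rfl
    · obtain ⟨e, hj0⟩ := c2
      subst e
      interval_cases j'
      rw [pv_Pval_zero_col]
    · rfl
  | succ kj ih =>
    obtain ⟨ihl, ihr, ihv⟩ := ih (by omega)
    rw [List.range_succ, List.foldl_append, List.foldl_cons, List.foldl_nil]
    set Q := (List.range kj).foldl (fun P j =>
        P.set (i+1) ((P.getD (i+1) []).set (j+1)
          ((P.getD i []).getD (j+1) 0 + (P.getD (i+1) []).getD j 0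
            - (P.getD i []).getD j 0 + (a.getD i []).getD j 0))) P with hQ
    have hi1 : i + 1 < Q.length := by omega
    have hrowQ : (Q.getD (i+1) []).length = colSz + 1 := by
      have e : Q.getD (i+1) [] = Q[i+1] := by
        rw [List.getD_eq_getElem?_getD, List.getElem?_eq_getElem hi1]; rfl
      rw [e]; exact ihr _ (List.getElem_mem hi1)
    refine ⟨by simp [ihl], ?_, ?_⟩
    · intro q hq
      rcases List.mem_or_eq_of_mem_set hq with h | h
      · exact ihr q h
      · subst h
        rw [List.length_set]
        exact hrowQ
    · intro i' h1 j' h2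
      by_cases hii : i' = i + 1
      · subst hii
        rw [pv_getD_set_eq _ _ _ hi1]
        by_cases hjj : j' = kj + 1
        · subst hjj
          rw [pv_getD_set_eq _ _ _ (by omega)]
          rw [if_neg (by omega), if_pos ⟨rfl, le_rfl⟩]
          have e1 := ihv i (by omega) (kj+1) (by omega)
          have e2 := ihv (i+1) (by omega) kj (by omega)
          have e3 := ihv i (by omega) kj (by omega)
          rw [if_pos le_rfl] at e1 e3
          rw [if_neg (by omega), if_pos ⟨rfl, le_rfl⟩] at e2
          rw [e1, e2, e3, pv_Pval_rec a i kj (by omega)]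
        · rw [pv_getD_set_ne _ _ _ _ (fun h => hjj h.symm)]
          rw [ihv (i+1) h1 j' h2, if_neg (show ¬ (i+1 ≤ i) by omega)]
          by_cases hc : j' ≤ kj
          · rw [if_pos ⟨rfl, hc⟩, if_neg (show ¬ (i+1 ≤ i) by omega), if_pos ⟨rfl, by omega⟩]
          · rw [if_neg (by intro h; omega), if_neg (show ¬ (i+1 ≤ i) by omega),
              if_neg (by intro h; omega)]
      · rw [pv_getD_set_ne _ _ _ _ (fun h => hii h.symm)]
        rw [ihv i' h1 j' h2]
        split_ifs with c1 c2 c3 <;> first | rfl | omega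

-- outer build: after k rows the table holds Pval on rows ≤ k
lemma pv_build_aux (a : List (List Int)) (rowSz colSz k : Nat) (hk : k ≤ rowSz)
    (hia : rowSz = a.length) :
    ((List.range k).foldl (fun P i =>
      (List.range colSz).foldl (fun P j =>
        P.set (i+1) ((P.getD (i+1) []).set (j+1)
          ((P.getD i []).getD (j+1) 0 + (P.getD (i+1) []).getD j 0
            - (P.getD i []).getD j 0 + (a.getD i []).getD j 0))) P)
      (List.replicate (rowSz+1) (List.replicate (colSz+1) 0))).length = rowSz + 1 ∧
    (∀ q ∈ ((List.range k).foldl (fun P i =>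
      (List.range colSz).foldl (fun P j =>
        P.set (i+1) ((P.getD (i+1) []).set (j+1)
          ((P.getD i []).getD (j+1) 0 + (P.getD (i+1) []).getD j 0
            - (P.getD i []).getD j 0 + (a.getD i []).getD j 0))) P)
      (List.replicate (rowSz+1) (List.replicate (colSz+1) 0))), q.length = colSz + 1) ∧
    (∀ i', i' ≤ rowSz → ∀ j', j' ≤ colSz →
      ((((List.range k).foldl (fun P i =>
      (List.range colSz).foldl (fun P j =>
        P.set (i+1) ((P.getD (i+1) []).set (j+1)
          ((P.getD i []).getD (j+1) 0 + (P.getD (i+1) []).getD j 0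
            - (P.getD i []).getD j 0 + (a.getD i []).getD j 0))) P)
      (List.replicate (rowSz+1) (List.replicate (colSz+1) 0))).getD i' []).getD j' 0) =
      if i' ≤ k then Pval a i' j' else 0) := by
  induction k with
  | zero =>
    simp only [List.range_zero, List.foldl_nil]
    refine ⟨by simp, by intro q hq; exact (List.eq_of_mem_replicate hq) ▸ (by simp), ?_⟩
    intro i' h1 j' h2
    have : (List.replicate (rowSz+1) (List.replicate (colSz+1) (0:Int))).getD i' [] =
        List.replicate (colSz+1) (0:Int) := by
      rw [List.getD_eq_getElem?_getD, List.getElem?_replicate, if_pos (by omega)]; rfl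
    rw [this, List.getD_eq_getElem?_getD, List.getElem?_replicate, if_pos (by omega)]
    split_ifs with c
    · interval_cases i'
      rw [pv_Pval_zero_row]; rfl
    · rfl
  | succ k ih =>
    obtain ⟨ihl, ihr, ihv⟩ := ih (by omega)
    rw [List.range_succ, List.foldl_append, List.foldl_cons, List.foldl_nil]
    have hfill := pv_fill_aux a rowSz colSz k colSz le_rfl (by omega) hia _ ihl ihr
      (by intro i' h1 j' h2; rw [ihv i' h1 j' h2])
    refine ⟨hfill.1, hfill.2.1, ?_⟩
    intro i' h1 j' h2
    rw [hfill.2.2 i' h1 j' h2]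
    split_ifs with c1 c2 c3 c4 <;> first | rfl | omega

lemma pv_build_getD (a : List (List Int)) (colSz i j : Nat)
    (hi : i ≤ a.length) (hj : j ≤ colSz) :
    ((bBuild a a.length colSz).getD i []).getD j 0 = Pval a i j := by
  have h := (pv_build_aux a a.length colSz a.length le_rfl rfl).2.2 i hi j hj
  rw [bBuild, h, if_pos hi]

lemma pv_find?_range_succ (p : Nat → Bool) (k : Nat) :
    (List.range (k+1)).find? p =
      if p 0 then some 0 else ((List.range k).find? (fun j => p (j+1))).map Nat.succ := by
  rw [List.range_succ_eq_map]
  cases hp : p 0 with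
  | true => rw [List.find?_cons_of_pos hp]; simp
  | false =>
    rw [List.find?_cons_of_neg (by simp [hp]), if_neg (by simp), List.find?_map]
    rfl

lemma pv_find?_range_snoc (p : Nat → Bool) (k : Nat) :
    (List.range (k+1)).find? p =
      ((List.range k).find? p).or (if p k then some k else none) := by
  rw [List.range_succ, List.find?_append]
  cases h : (List.range k).find? p
  · cases hk : p k <;> simp [List.find?, hk]
  · simp

-- a fold of bTop-style steps over tops on which no improving zero-candidate exists is the identity
lemma pv_top_skip (pf : Nat → Int) (w lI rI : Int) (bot : Nat)
    (best : Int × Int × Int × Int × Int) (ts : List Nat)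
    (h : ∀ s ∈ ts, pf s = pf (bot+1) → ((bot : Int) - s + 1) * w ≤ best.1) :
    ts.foldl (fun best top =>
      if pf top = pf (bot+1) then
        (if ((bot : Int) - top + 1) * w > best.1
          then (((bot : Int) - top + 1) * w, (top : Int), (bot : Int), lI, rI) else best)
      else best) best = best := by
  induction ts with
  | nil => rfl
  | cons t ts ih =>
    rw [List.foldl_cons]
    have e : (if pf t = pf (bot+1) then
        (if ((bot : Int) - t + 1) * w > best.1
          then (((bot : Int) - t + 1) * w, (t : Int), (bot : Int), lI, rI) else best)
      else best) = best := by
      split_ifs with c1 c2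
      · exact absurd c2 (not_lt.mpr (h t (by simp) c1))
      · rfl
      · rfl
    rw [e]
    exact ih (fun s hs => h s (by simp [hs]))

-- B's top-loop collapses to a single conditional update with the first (least-top) candidate
lemma pv_top_collapse (pf : Nat → Int) (w lI rI : Int) (hw : 0 < w) (bot : Nat)
    (s0 n : Nat) (hn : s0 + n = bot + 1) (best : Int × Int × Int × Int × Int) :
    (List.range' s0 n).foldl (fun best top =>
      if pf top = pf (bot+1) then
        (if ((bot : Int) - top + 1) * w > best.1
          then (((bot : Int) - top + 1) * w, (top : Int), (bot : Int), lI, rI) else best)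
      else best) best =
    (match (List.range' s0 n).find? (fun s => pf s == pf (bot+1)) with
      | some s => if ((bot : Int) - s + 1) * w > best.1
          then (((bot : Int) - s + 1) * w, (s : Int), (bot : Int), lI, rI) else best
      | none => best) := by
  induction n generalizing s0 best with
  | zero => rfl
  | succ n ih =>
    rw [List.range'_succ, List.foldl_cons]
    by_cases hz : pf s0 = pf (bot+1)
    · rw [List.find?_cons_of_pos (by simp [hz])]
      rw [if_pos hz]
      set best' := if ((bot : Int) - s0 + 1) * w > best.1
        then (((bot : Int) - s0 + 1) * w, (s0 : Int), (bot : Int), lI, rI) else best with hb'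
      have hb1 : ((bot : Int) - s0 + 1) * w ≤ best'.1 := by
        rw [hb']
        split_ifs with c
        · exact le_rfl
        · exact not_lt.mp c
      exact pv_top_skip pf w lI rI bot best' _ (fun s hs _ => by
        have hs1 : s0 + 1 ≤ s := (List.mem_range'_1.mp hs).1
        have : ((bot : Int) - s + 1) * w < ((bot : Int) - s0 + 1) * w := by
          apply mul_lt_mul_of_pos_right _ hw
          have : (s0 : Int) < (s : Int) := by exact_mod_cast hs1
          omega
        omega)
    · rw [List.find?_cons_of_neg (by simp [hz]), if_neg hz]
      exact ih (s0+1) (by omega) best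

-- bounds of the canonical per-(l,r) scan result
lemma pv_spec_bounds (pf : Nat → Int) (k n : Nat) (M0 : Int × Int × Int)
    (h0 : (M0.1 = -1 ∧ M0.2.1 = -1 ∧ M0.2.2 = -1) ∨
      (1 ≤ M0.1 ∧ 0 ≤ M0.2.1 ∧ M0.2.1 ≤ M0.2.2 ∧ M0.2.2 < (k : Int))) :
    (((List.range' k n).foldl (specStep pf) M0).1 = -1 ∧
      ((List.range' k n).foldl (specStep pf) M0).2.1 = -1 ∧
      ((List.range' k n).foldl (specStep pf) M0).2.2 = -1) ∨
    (1 ≤ ((List.range' k n).foldl (specStep pf) M0).1 ∧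
      0 ≤ ((List.range' k n).foldl (specStep pf) M0).2.1 ∧
      ((List.range' k n).foldl (specStep pf) M0).2.1 ≤ ((List.range' k n).foldl (specStep pf) M0).2.2 ∧
      ((List.range' k n).foldl (specStep pf) M0).2.2 < ((k + n : Nat) : Int)) := by
  induction n generalizing k M0 with
  | zero =>
    simp only [List.range'_zero, List.foldl_nil]
    rcases h0 with h | h
    · exact Or.inl h
    · right; push_cast at h ⊢; omega
  | succ n ih =>
    rw [List.range'_succ, List.foldl_cons]
    have hstep : (specStep pf M0 k).1 = -1 ∧ (specStep pf M0 k).2.1 = -1 ∧ (specStep pf M0 k).2.2 = -1 ∨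
        (1 ≤ (specStep pf M0 k).1 ∧ 0 ≤ (specStep pf M0 k).2.1 ∧
          (specStep pf M0 k).2.1 ≤ (specStep pf M0 k).2.2 ∧ (specStep pf M0 k).2.2 < ((k + 1 : Nat) : Int)) := by
      unfold specStep
      cases hf : (List.range (k+1)).find? (fun s => pf s == pf (k+1)) with
      | none =>
        dsimp only
        rcases h0 with h | h
        · exact Or.inl h
        · right; push_cast at h ⊢; omega
      | some s =>
        dsimp only
        have hs : s < k + 1 := List.mem_range.mp (List.mem_of_find?_eq_some hf)
        split_ifs with c
        · right
          dsimp only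
          have : (s : Int) ≤ (k : Int) := by exact_mod_cast Nat.lt_succ_iff.mp hs
          push_cast
          omega
        · rcases h0 with h | h
          · exact Or.inl h
          · right; push_cast at h ⊢; omega
    have := ih (k+1) (specStep pf M0 k) hstep
    rcases this with h | h
    · exact Or.inl h
    · right
      refine ⟨h.1, h.2.1, h.2.2.1, ?_⟩
      have := h.2.2.2
      push_cast at this ⊢
      omega

lemma pv_specStep_some (pf : Nat → Int) (M : Int × Int × Int) (k s : Nat)
    (hf : (List.range (k+1)).find? (fun s => pf s == pf (k+1)) = some s) :
    specStep pf M k = if (k : Int) - s + 1 > M.1 then ((k : Int) - s + 1, (s : Int), (k : Int)) else M := by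
  unfold specStep; rw [hf]

lemma pv_specStep_none (pf : Nat → Int) (M : Int × Int × Int) (k : Nat)
    (hf : (List.range (k+1)).find? (fun s => pf s == pf (k+1)) = none) :
    specStep pf M k = M := by
  unfold specStep; rw [hf]

lemma pv_botStep_some (pf : Nat → Int) (w lI rI : Int) (b : Int × Int × Int × Int × Int) (k s : Nat)
    (hf : (List.range (k+1)).find? (fun s => pf s == pf (k+1)) = some s) :
    pvBotStep pf w lI rI b k = if ((k : Int) - s + 1) * w > b.1
      then (((k : Int) - s + 1) * w, (s : Int), (k : Int), lI, rI) else b := by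
  unfold pvBotStep; rw [hf]

lemma pv_botStep_none (pf : Nat → Int) (w lI rI : Int) (b : Int × Int × Int × Int × Int) (k : Nat)
    (hf : (List.range (k+1)).find? (fun s => pf s == pf (k+1)) = none) :
    pvBotStep pf w lI rI b k = b := by
  unfold pvBotStep; rw [hf]

-- streaming strict-'>' updates against the global best equal A's two-stage compare
lemma pv_stream (pf : Nat → Int) (w lI rI : Int) (hw : 0 < w) (k n : Nat)
    (best : Int × Int × Int × Int × Int) (M0 : Int × Int × Int) :
    (List.range' k n).foldl (pvBotStep pf w lI rI)
      (if M0.1 * w > best.1 then (M0.1 * w, M0.2.1, M0.2.2, lI, rI) else best) =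
    (if ((List.range' k n).foldl (specStep pf) M0).1 * w > best.1
      then (((List.range' k n).foldl (specStep pf) M0).1 * w,
            ((List.range' k n).foldl (specStep pf) M0).2.1,
            ((List.range' k n).foldl (specStep pf) M0).2.2, lI, rI)
      else best) := by
  induction n generalizing k M0 with
  | zero => rfl
  | succ n ih =>
    rw [List.range'_succ, List.foldl_cons, List.foldl_cons]
    have hstep : pvBotStep pf w lI rI
        (if M0.1 * w > best.1 then (M0.1 * w, M0.2.1, M0.2.2, lI, rI) else best) k =
        (if (specStep pf M0 k).1 * w > best.1
          then ((specStep pf M0 k).1 * w, (specStep pf M0 k).2.1, (specStep pf M0 k).2.2, lI, rI)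
          else best) := by
      rcases hf : (List.range (k+1)).find? (fun s => pf s == pf (k+1)) with _ | s
      · rw [pv_botStep_none pf w lI rI _ k hf, pv_specStep_none pf M0 k hf]
      · rw [pv_botStep_some pf w lI rI _ k s hf, pv_specStep_some pf M0 k s hf]
        by_cases hc : (k : Int) - s + 1 > M0.1
        · have harea : ((k : Int) - s + 1) * w > M0.1 * w := mul_lt_mul_of_pos_right hc hw
          rw [if_pos hc]
          by_cases hMb : M0.1 * w > best.1
          · have hA : ((k : Int) - s + 1) * w > (M0.1 * w, M0.2.1, M0.2.2, lI, rI).1 := harea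
            have hB : (((k : Int) - s + 1, (s : Int), (k : Int)).1) * w > best.1 :=
              show ((k : Int) - s + 1) * w > best.1 by linarith
            rw [if_pos hMb, if_pos hA, if_pos hB]
          · rw [if_neg hMb]
        · have harea : ((k : Int) - s + 1) * w ≤ M0.1 * w :=
            mul_le_mul_of_nonneg_right (not_lt.mp hc) (le_of_lt hw)
          rw [if_neg hc]
          by_cases hMb : M0.1 * w > best.1
          · have hA : ¬ ((k : Int) - s + 1) * w > (M0.1 * w, M0.2.1, M0.2.2, lI, rI).1 :=
              not_lt.mpr harea
            rw [if_pos hMb, if_neg hA]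
          · have hA : ¬ ((k : Int) - s + 1) * w > best.1 := by linarith [not_lt.mp hMb]
            rw [if_neg hMb, if_neg hA]
    rw [hstep]
    exact ih (k+1) (specStep pf M0 k)

lemma pv_aUpd_aux (a : List (List Int)) (r rowSz k : Nat) (hk : k ≤ rowSz)
    (t : List Int) (ht : t.length = rowSz) :
    ((List.range k).foldl (aUpd a r) t).length = rowSz ∧
    ∀ i, i < rowSz → ((List.range k).foldl (aUpd a r) t).getD i 0 =
      if i < k then t.getD i 0 + (a.getD i []).getD r 0 else t.getD i 0 := by
  induction k with
  | zero => exact ⟨ht, fun i _ => by simp⟩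
  | succ k ih =>
    obtain ⟨ihl, ihg⟩ := ih (by omega)
    rw [List.range_succ, List.foldl_append, List.foldl_cons, List.foldl_nil]
    set p := (List.range k).foldl (aUpd a r) t with hp
    refine ⟨by simp [aUpd, ihl], ?_⟩
    intro i hi
    by_cases hik : i = k
    · subst hik
      rw [aUpd, pv_getD_set_eq _ _ _ (by omega), ihg i hi, if_neg (by omega), if_pos (by omega)]
    · rw [aUpd, pv_getD_set_ne _ _ _ _ (fun h => hik h.symm), ihg i hi]
      split_ifs <;> first | rfl | omega

-- one A row step equals the canonical conditional update, with the dictionary characterised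
-- as the first occurrence of each prefix value
lemma pv_stepA (a : List (List Int)) (l r colSz k : Nat)
    (tot mx ms me : Int) (seen : PySem.Dict Int Int) (tmp : List Int)
    (hv : tmp.getD k 0 = sval a l r k)
    (htot : tot = pvPref a l r k)
    (hseen : ∀ t, seen.get? t =
      ((List.range k).find? (fun j => pvPref a l r (j+1) == t)).map (fun j => (j : Int))) :
    (aStep colSz r ⟨tot, seen, mx, ms, me, tmp⟩ k).tot = pvPref a l r (k+1) ∧
    ((aStep colSz r ⟨tot, seen, mx, ms, me, tmp⟩ k).mx,
     (aStep colSz r ⟨tot, seen, mx, ms, me, tmp⟩ k).ms,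
     (aStep colSz r ⟨tot, seen, mx, ms, me, tmp⟩ k).me) = specStep (pvPref a l r) (mx, ms, me) k ∧
    (aStep colSz r ⟨tot, seen, mx, ms, me, tmp⟩ k).tmp = (if r = colSz - 1 then tmp.set k 0 else tmp) ∧
    (∀ t, (aStep colSz r ⟨tot, seen, mx, ms, me, tmp⟩ k).seen.get? t =
      ((List.range (k+1)).find? (fun j => pvPref a l r (j+1) == t)).map (fun j => (j : Int))) := by
  have hT : tot + tmp.getD k 0 = pvPref a l r (k+1) := by
    rw [htot, hv, pv_pref_succ]
  have hvpf : tmp.getD k 0 = pvPref a l r (k+1) - pvPref a l r k := by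
    rw [hv, pv_pref_succ]; ring
  have hsnoc : ∀ t : Int, (List.range (k+1)).find? (fun j => pvPref a l r (j+1) == t) =
      ((List.range k).find? (fun j => pvPref a l r (j+1) == t)).or
        (if pvPref a l r (k+1) == t then some k else none) :=
    fun t => pv_find?_range_snoc (fun j => pvPref a l r (j+1) == t) k
  rcases hF : (List.range k).find? (fun j => pvPref a l r (j+1) == pvPref a l r (k+1)) with _ | j0
  · -- dictionary miss: A inserts, no candidate unless the whole prefix is zero
    have hmiss : seen.get? (tot + tmp.getD k 0) = none := by
      rw [hT, hseen, hF]; rfl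
    have hnoprev : ∀ j, j < k → pvPref a l r (j+1) ≠ pvPref a l r (k+1) := by
      intro j hj heq
      have := List.find?_eq_none.mp hF j (List.mem_range.mpr hj)
      simp [heq] at this
    have hv0k : tmp.getD k 0 = 0 → k = 0 := by
      intro h0
      by_contra hk
      have h1 : pvPref a l r ((k-1)+1) = pvPref a l r (k+1) := by
        rw [Nat.sub_add_cancel (by omega)]
        omega
      exact hnoprev (k-1) (by omega) h1
    refine ⟨?_, ?_, ?_, ?_⟩
    · simp only [aStep, hmiss]
      exact hT
    · by_cases hT0 : pvPref a l r (k+1) = 0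
      · have hcand : (List.range (k+1)).find? (fun s => pvPref a l r s == pvPref a l r (k+1)) = some 0 := by
          rw [pv_find?_range_succ, if_pos (by simp [pv_pref_zero, hT0])]
        rw [pv_specStep_some _ _ _ _ hcand]
        simp only [aStep, hmiss]
        simp only [hT, hT0]
        by_cases hv0 : tmp.getD k 0 = 0
        · have hk0 : k = 0 := hv0k hv0
          subst hk0
          clear hseen hsnoc hv htot hvpf hmiss hnoprev hv0k hcand hF
          split_ifs <;> (try simp at *) <;> omega
        · clear hseen hsnoc hv htot hvpf hmiss hnoprev hv0k hcand hF
          split_ifs <;> (try simp at *) <;> omega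
      · have hp0 : ((fun s => pvPref a l r s == pvPref a l r (k+1)) 0) = false := by
          simp [pv_pref_zero]
          omega
        have hcand : (List.range (k+1)).find? (fun s => pvPref a l r s == pvPref a l r (k+1)) = none := by
          rw [pv_find?_range_succ, if_neg (by simp [hp0]), hF]
          rfl
        rw [pv_specStep_none _ _ _ hcand]
        have hv0 : tmp.getD k 0 ≠ 0 := by
          intro h0
          have hk0 : k = 0 := hv0k h0
          subst hk0
          rw [pv_pref_zero] at hvpf
          omega
        simp only [aStep, hmiss]
        simp only [hT]
        clear hseen hsnoc hv htot hvpf hmiss hnoprev hv0k hcand hp0 hF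
        split_ifs <;> (try simp at *) <;> omega
    · simp only [aStep, hmiss]
    · intro t
      simp only [aStep, hmiss]
      rw [hT, PySem.Dict.get?_insert, hsnoc t, hseen t]
      by_cases ht : pvPref a l r (k+1) = t
      · subst ht
        simp [hF]
      · simp [ht]
        intro h
        exact absurd h.symm ht
  · -- dictionary hit: j0 is the first row with this prefix value
    have hj0k : j0 < k := List.mem_range.mp (List.mem_of_find?_eq_some hF)
    have hj0p : pvPref a l r (j0+1) = pvPref a l r (k+1) := by
      have := List.find?_some hF
      simpa using this
    have hhit : seen.get? (tot + tmp.getD k 0) = some (j0 : Int) := by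
      rw [hT, hseen, hF]; rfl
    refine ⟨?_, ?_, ?_, ?_⟩
    · simp only [aStep, hhit]
      split_ifs <;> exact hT
    · by_cases hT0 : pvPref a l r (k+1) = 0
      · have hcand : (List.range (k+1)).find? (fun s => pvPref a l r s == pvPref a l r (k+1)) = some 0 := by
          rw [pv_find?_range_succ, if_pos (by simp [pv_pref_zero, hT0])]
        rw [pv_specStep_some _ _ _ _ hcand]
        simp only [aStep, hhit]
        simp only [hT, hT0]
        clear hseen hsnoc hv htot hvpf hhit hcand hF hj0p
        split_ifs <;> (try simp at *) <;> omega
      · have hcand : (List.range (k+1)).find? (fun s => pvPref a l r s == pvPref a l r (k+1)) = some (j0+1) := by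
          rw [pv_find?_range_succ, if_neg (by simp [pv_pref_zero]; omega), hF]
          rfl
        rw [pv_specStep_some _ _ _ _ hcand]
        simp only [aStep, hhit]
        simp only [hT]
        clear hseen hsnoc hv htot hvpf hhit hcand hF hj0p
        split_ifs <;> (try simp at *) <;> omega
    · simp only [aStep, hhit]
      split_ifs <;> rfl
    · intro t
      have hg : seen.get? t =
          ((List.range (k+1)).find? (fun j => pvPref a l r (j+1) == t)).map (fun j => (j : Int)) := by
        rw [hseen t, hsnoc t]
        by_cases ht : pvPref a l r (k+1) = t
        · subst ht
          simp [hF]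
        · simp [ht]
      simp only [aStep, hhit]
      split_ifs <;> exact hg

-- the whole A row scan computes the canonical spec fold, and records the tmp reset
lemma pv_scanA (a : List (List Int)) (l r colSz : Nat) (k n : Nat) (hkn : k + n ≤ a.length)
    (tot mx ms me : Int) (seen : PySem.Dict Int Int) (tmp : List Int)
    (hlen : tmp.length = a.length)
    (htmp : ∀ i, k ≤ i → i < a.length → tmp.getD i 0 = sval a l r i)
    (htot : tot = pvPref a l r k)
    (hseen : ∀ t, seen.get? t =
      ((List.range k).find? (fun j => pvPref a l r (j+1) == t)).map (fun j => (j : Int))) :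
    ((List.range' k n).foldl (aStep colSz r) ⟨tot, seen, mx, ms, me, tmp⟩).mx =
      ((List.range' k n).foldl (specStep (pvPref a l r)) (mx, ms, me)).1 ∧
    ((List.range' k n).foldl (aStep colSz r) ⟨tot, seen, mx, ms, me, tmp⟩).ms =
      ((List.range' k n).foldl (specStep (pvPref a l r)) (mx, ms, me)).2.1 ∧
    ((List.range' k n).foldl (aStep colSz r) ⟨tot, seen, mx, ms, me, tmp⟩).me =
      ((List.range' k n).foldl (specStep (pvPref a l r)) (mx, ms, me)).2.2 ∧
    ((List.range' k n).foldl (aStep colSz r) ⟨tot, seen, mx, ms, me, tmp⟩).tmp.length = a.length ∧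
    (∀ i, i < a.length →
      ((List.range' k n).foldl (aStep colSz r) ⟨tot, seen, mx, ms, me, tmp⟩).tmp.getD i 0 =
        if r = colSz - 1 ∧ k ≤ i ∧ i < k + n then 0 else tmp.getD i 0) := by
  induction n generalizing k tot mx ms me seen tmp with
  | zero =>
    simp only [List.range'_zero, List.foldl_nil]
    refine ⟨trivial, trivial, trivial, hlen, ?_⟩
    intro i hi
    rw [if_neg (by omega)]
  | succ n ih =>
    rw [List.range'_succ, List.foldl_cons, List.foldl_cons]
    have hk : k < a.length := by omega
    obtain ⟨e_tot, e_tri, e_tmp, e_seen⟩ :=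
      pv_stepA a l r colSz k tot mx ms me seen tmp (htmp k le_rfl hk) htot hseen
    set SA := aStep colSz r ⟨tot, seen, mx, ms, me, tmp⟩ k with hSA
    set M1 := specStep (pvPref a l r) (mx, ms, me) k with hM1
    have hlen' : SA.tmp.length = a.length := by
      rw [e_tmp]; split_ifs <;> simp [hlen]
    have htmpget : ∀ i, i < a.length →
        SA.tmp.getD i 0 = if r = colSz - 1 ∧ i = k then 0 else tmp.getD i 0 := by
      intro i hi
      rw [e_tmp]
      by_cases hr : r = colSz - 1
      · rw [if_pos hr]
        by_cases hik : i = k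
        · subst hik
          rw [pv_getD_set_eq _ _ _ (by omega), if_pos ⟨hr, rfl⟩]
        · rw [pv_getD_set_ne _ _ _ _ (fun h => hik h.symm), if_neg (by tauto)]
      · rw [if_neg hr, if_neg (by tauto)]
    have htmp' : ∀ i, k + 1 ≤ i → i < a.length → SA.tmp.getD i 0 = sval a l r i := by
      intro i h1 h2
      rw [htmpget i h2, if_neg (by rintro ⟨_, rfl⟩; omega), htmp i (by omega) h2]
    have IH := ih (k+1) (by omega) SA.tot M1.1 M1.2.1 M1.2.2 SA.seen SA.tmp hlen' htmp' e_tot e_seen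
    have e1 : SA.mx = M1.1 := by rw [← e_tri]
    have e2 : SA.ms = M1.2.1 := by rw [← e_tri]
    have e3 : SA.me = M1.2.2 := by rw [← e_tri]
    have eA : (⟨SA.tot, SA.seen, M1.1, M1.2.1, M1.2.2, SA.tmp⟩ : AScan) = SA := by
      rw [← e1, ← e2, ← e3]
    have eM : ((M1.1, M1.2.1, M1.2.2) : Int × Int × Int) = M1 := rfl
    rw [eA, eM] at IH
    refine ⟨IH.1, IH.2.1, IH.2.2.1, IH.2.2.2.1, ?_⟩
    intro i hi
    rw [IH.2.2.2.2 i hi, htmpget i hi]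
    split_ifs <;> first | rfl | omega

-- per-(l,r) body: A's update-scan-compare equals B's streamed brute-force scan over rectangles
lemma pv_inner_eq (a : List (List Int)) (colSz l r : Nat) (hlr : l ≤ r) (hr : r < colSz)
    (best : Int × Int × Int × Int × Int) (tmp : List Int) (hlen : tmp.length = a.length)
    (htmp : ∀ i, i < a.length → tmp.getD i 0 =
      ((a.getD i []).take r).sum - ((a.getD i []).take l).sum)
    (hbox : Box a.length colSz best) :
    (aInner a a.length colSz l r best tmp).1 =
      (List.range a.length).foldl (bBot (bBuild a a.length colSz) l r) best ∧
    Box a.length colSz ((List.range a.length).foldl (bBot (bBuild a a.length colSz) l r) best) ∧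
    (aInner a a.length colSz l r best tmp).2.length = a.length ∧
    (∀ i, i < a.length → (aInner a a.length colSz l r best tmp).2.getD i 0 =
      if r = colSz - 1 then 0
      else ((a.getD i []).take (r + 1)).sum - ((a.getD i []).take l).sum) := by
  have hw : (0 : Int) < (r : Int) - (l : Int) + 1 := by
    have : (l : Int) ≤ (r : Int) := by exact_mod_cast hlr
    omega
  have hbest1 : (-1 : Int) ≤ best.1 := by
    rcases hbox with h | h
    · omega
    · omega
  -- A side: refresh tmp, then the scan
  obtain ⟨hl2, hg2⟩ := pv_aUpd_aux a r a.length a.length le_rfl tmp hlen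
  set tmp2 := (List.range a.length).foldl (aUpd a r) tmp with htmp2
  have hval2 : ∀ i, 0 ≤ i → i < a.length → tmp2.getD i 0 = sval a l r i := by
    intro i _ hi
    rw [hg2 i hi, if_pos hi, htmp i hi, sval, pv_take_succ_sum]
    ring
  obtain ⟨e_mx, e_ms, e_me, e_len, e_tmp⟩ :=
    pv_scanA a l r colSz 0 a.length (by omega) 0 (-1) (-1) (-1) PySem.Dict.empty tmp2 hl2
      (fun i h1 h2 => hval2 i h1 h2) (pv_pref_zero a l r).symm
      (by intro t; simp [PySem.Dict.get?_empty])
  -- B side: each bot-step is the collapsed first-candidate update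
  have hbstep : ∀ (b : Int × Int × Int × Int × Int) (bot : Nat), bot ∈ List.range a.length →
      bBot (bBuild a a.length colSz) l r b bot =
        pvBotStep (pvPref a l r) ((r : Int) - (l : Int) + 1) (l : Int) (r : Int) b bot := by
    intro b bot hbot
    have hbotlen : bot < a.length := List.mem_range.mp hbot
    have hcond : ∀ (b' : Int × Int × Int × Int × Int) (top : Nat), top ∈ List.range (bot+1) →
        bTop (bBuild a a.length colSz) l r bot b' top =
          (fun b' top => if pvPref a l r top = pvPref a l r (bot+1) then
            (if ((bot : Int) - top + 1) * ((r : Int) - (l : Int) + 1) > b'.1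
              then (((bot : Int) - top + 1) * ((r : Int) - (l : Int) + 1),
                (top : Int), (bot : Int), (l : Int), (r : Int)) else b')
            else b') b' top := by
      intro b' top htop
      have htople : top ≤ a.length := by
        have := List.mem_range.mp htop
        omega
      have g1 := pv_build_getD a colSz (bot+1) (r+1) (by omega) (by omega)
      have g2 := pv_build_getD a colSz top (r+1) htople (by omega)
      have g3 := pv_build_getD a colSz (bot+1) l (by omega) (by omega)
      have g4 := pv_build_getD a colSz top l htople (by omega)
      have c1 := pv_Pcol a l r (bot+1) (by omega)
      have c2 := pv_Pcol a l r top htople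
      unfold bTop
      rw [g1, g2, g3, g4]
      have hiff : (Pval a (bot+1) (r+1) - Pval a top (r+1) - Pval a (bot+1) l + Pval a top l = 0) ↔
          (pvPref a l r top = pvPref a l r (bot+1)) := by
        constructor <;> intro h <;> omega
      rw [if_congr hiff rfl rfl]
    unfold bBot
    rw [PySem.List.foldl_congr_mem _ _ _ _ (fun acc x hx => hcond acc x hx)]
    rw [List.range_eq_range']
    rw [pv_top_collapse (pvPref a l r) ((r : Int) - (l : Int) + 1) (l : Int) (r : Int) hw bot 0
      (bot+1) (by omega) b]
    unfold pvBotStep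
    rw [← List.range_eq_range']
  have hBfold : (List.range a.length).foldl (bBot (bBuild a a.length colSz) l r) best =
      (List.range a.length).foldl
        (pvBotStep (pvPref a l r) ((r : Int) - (l : Int) + 1) (l : Int) (r : Int)) best :=
    PySem.List.foldl_congr_mem _ _ _ _ (fun acc x hx => hbstep acc x hx)
  have hbase : (if ((-1 : Int), (-1 : Int), (-1 : Int)).1 * ((r : Int) - (l : Int) + 1) > best.1
      then (((-1 : Int), (-1 : Int), (-1 : Int)).1 * ((r : Int) - (l : Int) + 1),
        ((-1 : Int), (-1 : Int), (-1 : Int)).2.1, ((-1 : Int), (-1 : Int), (-1 : Int)).2.2,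
        (l : Int), (r : Int)) else best) = best := by
    rw [if_neg]
    dsimp only
    omega
  have hstream := pv_stream (pvPref a l r) ((r : Int) - (l : Int) + 1) (l : Int) (r : Int) hw
    0 a.length best ((-1 : Int), (-1 : Int), (-1 : Int))
  rw [hbase] at hstream
  set M := (List.range' 0 a.length).foldl (specStep (pvPref a l r)) ((-1 : Int), (-1 : Int), (-1 : Int)) with hM
  have hbnd := pv_spec_bounds (pvPref a l r) 0 a.length ((-1 : Int), (-1 : Int), (-1 : Int))
    (Or.inl ⟨rfl, rfl, rfl⟩)
  rw [← hM] at hbnd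
  have hBval : (List.range a.length).foldl (bBot (bBuild a a.length colSz) l r) best =
      (if M.1 * ((r : Int) - (l : Int) + 1) > best.1
        then (M.1 * ((r : Int) - (l : Int) + 1), M.2.1, M.2.2, (l : Int), (r : Int)) else best) := by
    rw [hBfold, List.range_eq_range', hstream]
  refine ⟨?_, ?_, ?_, ?_⟩
  · simp only [aInner]
    rw [← htmp2]
    simp only [← List.range_eq_range'] at e_mx e_ms e_me
    rw [hBval, e_mx, e_ms, e_me]
  · rw [hBval]
    split_ifs with hc
    · right
      rcases hbnd with ⟨b1, _, _⟩ | ⟨b1, b2, b3, b4⟩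
      · exfalso
        rw [b1] at hc
        omega
      · have hge : (1 : Int) * 1 ≤ M.1 * ((r : Int) - (l : Int) + 1) :=
          mul_le_mul b1 (by omega) (by omega) (by omega)
        refine ⟨by dsimp only; omega, by dsimp only; omega, by dsimp only; omega,
          by dsimp only; push_cast at b4 ⊢; omega, by dsimp only; omega,
          by dsimp only; exact_mod_cast hlr, by dsimp only; exact_mod_cast hr⟩
    · exact hbox
  · simp only [aInner]
    rw [← htmp2]
    simp only [← List.range_eq_range'] at e_len
    exact e_len
  · intro i hi
    simp only [aInner]
    rw [← htmp2]
    simp only [← List.range_eq_range'] at e_tmp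
    rw [e_tmp i hi]
    split_ifs with h1 h2 h3
    · rfl
    · exfalso; omega
    · exfalso; exact h1 ⟨h3, by omega, by omega⟩
    · rw [hval2 i (by omega) hi, sval]

-- fold over col_right for a fixed col_left
lemma pv_rfold_eq (a : List (List Int)) (colSz l m r0 : Nat) (hl0 : l ≤ r0) (hm : r0 + m = colSz)
    (best : Int × Int × Int × Int × Int) (tmp : List Int) (hlen : tmp.length = a.length)
    (htmp : ∀ i, i < a.length → tmp.getD i 0 =
      ((a.getD i []).take r0).sum - ((a.getD i []).take l).sum)
    (hbox : Box a.length colSz best) :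
    ((List.range' r0 m).foldl (fun st r => aInner a a.length colSz l r st.1 st.2) (best, tmp)).1 =
      (List.range' r0 m).foldl
        (fun best r => (List.range a.length).foldl (bBot (bBuild a a.length colSz) l r) best) best ∧
    Box a.length colSz ((List.range' r0 m).foldl
      (fun best r => (List.range a.length).foldl (bBot (bBuild a a.length colSz) l r) best) best) ∧
    ((List.range' r0 m).foldl (fun st r => aInner a a.length colSz l r st.1 st.2) (best, tmp)).2.length = a.length ∧
    (∀ i, i < a.length →
      ((List.range' r0 m).foldl (fun st r => aInner a a.length colSz l r st.1 st.2) (best, tmp)).2.getD i 0 =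
        if m = 0 then tmp.getD i 0 else 0) := by
  induction m generalizing r0 best tmp with
  | zero =>
    simp only [List.range'_zero, List.foldl_nil]
    refine ⟨trivial, hbox, hlen, fun i hi => by simp⟩
  | succ m ih =>
    rw [List.range'_succ, List.foldl_cons, List.foldl_cons]
    have hr0c : r0 < colSz := by omega
    obtain ⟨e_best, e_boxN, e_len, e_tmp⟩ := pv_inner_eq a colSz l r0 hl0 hr0c best tmp hlen htmp hbox
    have hpair : (aInner a a.length colSz l r0 best tmp) =
        ((aInner a a.length colSz l r0 best tmp).1, (aInner a a.length colSz l r0 best tmp).2) := rfl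
    by_cases hm0 : m = 0
    · subst hm0
      have hrl : r0 = colSz - 1 := by omega
      simp only [List.range'_zero, List.foldl_nil]
      refine ⟨?_, ?_, ?_, ?_⟩
      · exact e_best
      · exact e_boxN
      · exact e_len
      · intro i hi
        rw [if_neg (by omega)]
        exact (e_tmp i hi).trans (if_pos hrl)
    · have hr0ne : r0 ≠ colSz - 1 := by omega
      have htmp' : ∀ i, i < a.length → (aInner a a.length colSz l r0 best tmp).2.getD i 0 =
          ((a.getD i []).take (r0 + 1)).sum - ((a.getD i []).take l).sum := by
        intro i hi
        rw [e_tmp i hi, if_neg hr0ne]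
      have IH := ih (r0 + 1) (by omega) (by omega)
        ((List.range a.length).foldl (bBot (bBuild a a.length colSz) l r0) best)
        (aInner a a.length colSz l r0 best tmp).2 e_len htmp' e_boxN
      rw [hpair, e_best]
      refine ⟨IH.1, IH.2.1, IH.2.2.1, ?_⟩
      intro i hi
      rw [IH.2.2.2 i hi, if_neg hm0, if_neg (by omega)]

-- fold over col_left
lemma pv_lfold_eq (a : List (List Int)) (colSz m l0 : Nat) (hm : l0 + m = colSz)
    (best : Int × Int × Int × Int × Int) (tmp : List Int) (hlen : tmp.length = a.length)
    (htmp : ∀ i, i < a.length → tmp.getD i 0 = 0)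
    (hbox : Box a.length colSz best) :
    ((List.range' l0 m).foldl (fun st l =>
        (List.range' l (colSz - l)).foldl (fun st r => aInner a a.length colSz l r st.1 st.2) st)
      (best, tmp)).1 =
      (List.range' l0 m).foldl (fun best l =>
        (List.range' l (colSz - l)).foldl
          (fun best r => (List.range a.length).foldl (bBot (bBuild a a.length colSz) l r) best) best) best ∧
    Box a.length colSz ((List.range' l0 m).foldl (fun best l =>
      (List.range' l (colSz - l)).foldl
        (fun best r => (List.range a.length).foldl (bBot (bBuild a a.length colSz) l r) best) best) best) := by
  induction m generalizing l0 best tmp with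
  | zero =>
    simp only [List.range'_zero, List.foldl_nil]
    exact ⟨trivial, hbox⟩
  | succ m ih =>
    rw [List.range'_succ, List.foldl_cons, List.foldl_cons]
    have hl0c : l0 < colSz := by omega
    obtain ⟨e1, e2, e3, e4⟩ := pv_rfold_eq a colSz l0 (colSz - l0) l0 le_rfl (by omega) best tmp hlen
      (fun i hi => by rw [htmp i hi]; exact (sub_self _).symm) hbox
    have hC : colSz - l0 ≠ 0 := by omega
    have IH := ih (l0 + 1) (by omega)
      ((List.range' l0 (colSz - l0)).foldl
        (fun best r => (List.range a.length).foldl (bBot (bBuild a a.length colSz) l0 r) best) best)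
      ((List.range' l0 (colSz - l0)).foldl
        (fun st r => aInner a a.length colSz l0 r st.1 st.2) (best, tmp)).2 e3
      (fun i hi => by rw [e4 i hi, if_neg hC]) e2
    have hpair : ((List.range' l0 (colSz - l0)).foldl
        (fun st r => aInner a a.length colSz l0 r st.1 st.2) (best, tmp)) =
        (((List.range' l0 (colSz - l0)).foldl
          (fun st r => aInner a a.length colSz l0 r st.1 st.2) (best, tmp)).1,
         ((List.range' l0 (colSz - l0)).foldl
          (fun st r => aInner a a.length colSz l0 r st.1 st.2) (best, tmp)).2) := rfl
    rw [hpair, e1]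
    exact IH

-- rendering the answer: A's index comprehension = B's slices, under the bounds Box provides
lemma pv_out_eq (a : List (List Int)) (rs re cs ce : Int)
    (h1 : 0 ≤ rs) (h2 : rs ≤ re) (h3 : re < (a.length : Int))
    (h4 : 0 ≤ cs) (h5 : cs ≤ ce) (h6 : ∀ row ∈ a, ce < (row.length : Int)) :
    (PySem.List.pyRange rs (re + 1) 1).map (fun i =>
      (PySem.List.pyRange cs (ce + 1) 1).map (fun j =>
        PySem.List.pyGetD (PySem.List.pyGetD a i []) j 0)) =
    (PySem.List.slice a (some rs) (some (re + 1))).map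
      (fun row => PySem.List.slice row (some cs) (some (ce + 1))) := by
  obtain ⟨rsn, rfl⟩ : ∃ n : Nat, rs = (n : Int) := ⟨rs.toNat, (Int.toNat_of_nonneg h1).symm⟩
  obtain ⟨ren, rfl⟩ : ∃ n : Nat, re = (n : Int) := ⟨re.toNat, (Int.toNat_of_nonneg (by omega)).symm⟩
  obtain ⟨csn, rfl⟩ : ∃ n : Nat, cs = (n : Int) := ⟨cs.toNat, (Int.toNat_of_nonneg h4).symm⟩
  obtain ⟨cen, rfl⟩ : ∃ n : Nat, ce = (n : Int) := ⟨ce.toNat, (Int.toNat_of_nonneg (by omega)).symm⟩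
  have hre : ren < a.length := by exact_mod_cast h3
  have hrsre : rsn ≤ ren := by exact_mod_cast h2
  have hcsce : csn ≤ cen := by exact_mod_cast h5
  have e1 : ((ren : Int) + 1) = ((ren + 1 : Nat) : Int) := by push_cast; ring
  have e2 : ((cen : Int) + 1) = ((cen + 1 : Nat) : Int) := by push_cast; ring
  rw [e1, e2]
  simp only [PySem.List.slice_natCast, PySem.List.pyRange_one, List.map_map]
  apply List.ext_getElem
  · simp only [List.length_map, List.length_range, List.length_take, List.length_drop]
    omega
  · intro n h₁ h₂
    have hn : n < ren + 1 - rsn := by simpa using h₁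
    have hrow : rsn + n < a.length := by omega
    simp only [List.getElem_map, List.getElem_range, Function.comp_apply]
    rw [List.getElem_take, List.getElem_drop]
    have hcast : ((rsn : Int) + (n : Int)) = ((rsn + n : Nat) : Int) := by push_cast; ring
    rw [hcast, PySem.List.pyGetD_natCast]
    have hgd : a.getD (rsn + n) [] = a[rsn + n] := by
      rw [List.getD_eq_getElem?_getD, List.getElem?_eq_getElem hrow]
      rfl
    rw [hgd]
    have hce : cen < a[rsn + n].length := by
      have := h6 a[rsn + n] (List.getElem_mem hrow)
      exact_mod_cast this
    apply List.ext_getElem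
    · simp only [List.length_map, List.length_range, List.length_take, List.length_drop]
      omega
    · intro m m₁ m₂
      have hm : m < cen + 1 - csn := by simpa using m₁
      simp only [List.getElem_map, List.getElem_range, Function.comp_apply]
      rw [List.getElem_take, List.getElem_drop]
      have hcast2 : ((csn : Int) + (m : Int)) = ((csn + m : Nat) : Int) := by push_cast; ring
      rw [hcast2, PySem.List.pyGetD_natCast, List.getD_eq_getElem?_getD,
        List.getElem?_eq_getElem (by omega)]
      rfl

-- ===== VERDICT (by name: the statement is the Claim_ definition above) =====
theorem sumZeroMatrix_spec : Claim_equal_sumZeroMatrix := by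
  intro a _ hpre
  obtain ⟨hne, hrows⟩ := hpre
  unfold Spec_sumZeroMatrix
  have hA : sumZeroMatrix a =
      (let res := (List.range' 0 (a.getD 0 []).length).foldl
          (fun st l => (List.range' l ((a.getD 0 []).length - l)).foldl
            (fun st r => aInner a a.length (a.getD 0 []).length l r st.1 st.2) st)
          ((-1, -1, -1, -1, -1), List.replicate a.length 0)
       let best := res.1
       if best.1 = -1 then []
       else (PySem.List.pyRange best.2.1 (best.2.2.1 + 1) 1).map (fun i =>
         (PySem.List.pyRange best.2.2.2.1 (best.2.2.2.2 + 1) 1).map (fun j =>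
           PySem.List.pyGetD (PySem.List.pyGetD a i []) j 0))) := by
    simp only [sumZeroMatrix]
    rw [(List.range_eq_range' : List.range (a.getD 0 []).length = _)]
  have hB : sumZeroMatrix_alt a =
      (let best := (List.range' 0 (a.getD 0 []).length).foldl
          (fun best l => (List.range' l ((a.getD 0 []).length - l)).foldl
            (fun best r => (List.range a.length).foldl
              (bBot (bBuild a a.length (a.getD 0 []).length) l r) best) best)
          ((-1, -1, -1, -1, -1) : Int × Int × Int × Int × Int)
       if best.1 = -1 then []
       else (PySem.List.slice a (some best.2.1) (some (best.2.2.1 + 1))).map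
         (fun row => PySem.List.slice row (some best.2.2.2.1) (some (best.2.2.2.2 + 1)))) := by
    simp only [sumZeroMatrix_alt]
    rw [(List.range_eq_range' : List.range (a.getD 0 []).length = _)]
  obtain ⟨e1, e2⟩ := pv_lfold_eq a (a.getD 0 []).length (a.getD 0 []).length 0 (by omega)
    (-1, -1, -1, -1, -1) (List.replicate a.length 0) (by simp)
    (fun i hi => by rw [List.getD_eq_getElem?_getD, List.getElem?_replicate]; split <;> rfl)
    (Or.inl ⟨rfl, rfl, rfl, rfl, rfl⟩)
  rw [hA, hB]
  simp only []
  rw [e1]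
  set RB := (List.range' 0 (a.getD 0 []).length).foldl
      (fun best l => (List.range' l ((a.getD 0 []).length - l)).foldl
        (fun best r => (List.range a.length).foldl
          (bBot (bBuild a a.length (a.getD 0 []).length) l r) best) best)
      ((-1, -1, -1, -1, -1) : Int × Int × Int × Int × Int) with hRB
  by_cases hz : RB.1 = -1
  · rw [if_pos hz, if_pos hz]
  · rw [if_neg hz, if_neg hz]
    rcases e2 with hb | hb
    · exact absurd hb.1 hz
    · obtain ⟨_, b2, b3, b4, b5, b6, b7⟩ := hb
      apply pv_out_eq a _ _ _ _ b2 b3 b4 b5 b6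
      intro row hrow
      have h1 : (a.headD []).length ≤ row.length := hrows row hrow
      have h2 : (a.getD 0 []).length = (a.headD []).length := by cases a <;> rfl
      have : RB.2.2.2.2 < ((a.getD 0 []).length : Int) := b7
      omega
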